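-- pv_equiv track=rewrite | github.com/Conan286/Python_PTIT | PY01056-CHANLENGUYENTO.py | chanlenguyento
-- ===== SOURCE A (Python) =====
-- import math
--
-- def prime(n):
--     k = int(math.sqrt(n))
--     for i in range (2,k+1):
--         if n%i == 0:
--             return 0
--     return 1 if n>1 else 0
--
-- def chanlenguyento(s):
--    i = 0
--    n = len(s)
--    sum = 0
--    while i<n:
--        k = ord(s[i])-48
--        if (i%2 == 0 and k%2!=0 ) or (i%2 != 0 and k%2==0):
--            return 0
--        sum += k
--        i += 1
--    return 1 if prime(sum) else 0
-- ===== SOURCE B (Python) =====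
-- def prime_naive(x):
--     for d in range(2, x):
--         if x % d == 0:
--             return False
--     return x > 1
--
--
-- def chanlenguyento(s):
--     digits = [ord(c) - 48 for c in s]
--     if any(d % 2 != i % 2 for i, d in enumerate(digits)):
--         return 0
--     return 1 if prime_naive(sum(digits)) else 0
-- ===== Notes on version B (the rewrite author's own statement) =====
-- stated objective: alternative
-- what changed: The early-return while loop over an index becomes a single any() over enumerate(digits) plus sum(), and the sqrt-bounded trial-division primality test is replaced by full-range trial division over range(2, x).
-- crash fix: On strings that pass the parity check but whose digit sum of ord(c)-48 is negative (e.g. ' '), A raises ValueError from math.sqrt of a negative number while B returns 0. — e.g. on chanlenguyento(" "): A raises ValueError, B returns 0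
import Mathlib
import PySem

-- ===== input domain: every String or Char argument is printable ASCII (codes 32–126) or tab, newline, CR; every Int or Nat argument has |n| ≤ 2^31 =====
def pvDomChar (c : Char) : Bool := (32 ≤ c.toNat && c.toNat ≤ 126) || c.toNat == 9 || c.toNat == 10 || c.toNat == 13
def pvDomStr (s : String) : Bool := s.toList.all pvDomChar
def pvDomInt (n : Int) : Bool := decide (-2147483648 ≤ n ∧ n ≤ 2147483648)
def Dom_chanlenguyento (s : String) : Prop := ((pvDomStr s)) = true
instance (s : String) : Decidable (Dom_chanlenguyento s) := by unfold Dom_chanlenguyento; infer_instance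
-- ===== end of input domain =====

-- B replaces A's early-return index loop by any(...) over enumerate plus sum(), and the
-- sqrt-bounded trial division by full-range trial division (alternative decomposition, not faster).

-- ===== PORT A =====
-- for i in range(2, k+1): if n % i == 0: return 0; after the loop: 1 if n > 1 else 0
def pvPrimeLoopA (n : Int) : List Int → Int
  | [] => if 1 < n then 1 else 0
  | i :: rest => if PySem.Int.mod n i == 0 then 0 else pvPrimeLoopA n rest

-- k = int(math.sqrt(n)) ported as the integer square root Nat.sqrt (n ≥ 0 on all admitted inputs)
def pvPrimeA (n : Int) : Int :=
  pvPrimeLoopA n (PySem.List.pyRange 2 ((Nat.sqrt n.toNat : Int) + 1) 1)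

-- the while i < n loop: remaining characters, the index i, and the running sum
def pvLoopA : List Char → Nat → Int → Int
  | [], _, sum => if pvPrimeA sum ≠ 0 then 1 else 0
  | c :: rest, i, sum =>
    let k : Int := (c.toNat : Int) - 48
    if (decide (i % 2 = 0) && (PySem.Int.mod k 2 != 0))
        || (decide (¬ i % 2 = 0) && (PySem.Int.mod k 2 == 0)) then 0
    else pvLoopA rest (i + 1) (sum + k)

def chanlenguyento (s : String) : Int := pvLoopA s.toList 0 0

-- ===== PORT B =====
-- for d in range(2, x): if x % d == 0: return False; after the loop: x > 1
def pvPrimeLoopB (x : Int) : List Int → Bool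
  | [] => decide (1 < x)
  | d :: rest => if PySem.Int.mod x d == 0 then false else pvPrimeLoopB x rest

def pvPrimeB (x : Int) : Bool := pvPrimeLoopB x (PySem.List.pyRange 2 x 1)

def chanlenguyento_alt (s : String) : Int :=
  let digits := s.toList.map (fun c => (c.toNat : Int) - 48)
  if (PySem.List.enumerate digits 0).any
      (fun p => PySem.Int.mod p.2 2 != PySem.Int.mod p.1 2) then 0
  else if pvPrimeB (digits.foldl (· + ·) 0) then 1 else 0

-- ===== PRECONDITION & SPEC =====
-- shared vocabulary for Pre_/Raises_ (readable restatements, not the ports)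
def pvParityOK (cs : List Char) : Bool :=
  !((PySem.List.enumerate (cs.map (fun c => (c.toNat : Int) - 48)) 0).any
      (fun p => PySem.Int.mod p.2 2 != PySem.Int.mod p.1 2))
def pvDigitSum (cs : List Char) : Int :=
  (cs.map (fun c => (c.toNat : Int) - 48)).foldl (· + ·) 0

-- Pre_ excludes exactly the inputs on which A raises: strings whose digit codes alternate in
-- parity with the index but whose sum of (ord(c)-48) is negative — there A calls math.sqrt
-- on a negative number and raises ValueError.
def Pre_chanlenguyento (s : String) : Prop :=
  pvParityOK s.toList = true → 0 ≤ pvDigitSum s.toList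
instance (s : String) : Decidable (Pre_chanlenguyento s) := by unfold Pre_chanlenguyento; infer_instance

def pvWitness_chanlenguyento : String := "29"

-- On strings that pass the parity check but whose digit sum of ord(c)-48 is negative,
-- A raises ValueError from math.sqrt while B returns 0.
def Raises_chanlenguyento (s : String) : Prop :=
  pvParityOK s.toList = true ∧ pvDigitSum s.toList < 0
instance (s : String) : Decidable (Raises_chanlenguyento s) := by unfold Raises_chanlenguyento; infer_instance
def pvRaiseWitness_chanlenguyento : String := " "
def pvRaiseWitnessOut_chanlenguyento : Int := 0

def Spec_chanlenguyento (s : String) (out : Int) : Prop := out = chanlenguyento_alt s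
instance (s : String) (out : Int) : Decidable (Spec_chanlenguyento s out) := by unfold Spec_chanlenguyento; infer_instance

-- ===== CLAIM (what is proved, stated in full; the proofs are below) =====
def Claim_equal_chanlenguyento : Prop := ∀ (s : String), Dom_chanlenguyento s → Pre_chanlenguyento s → Spec_chanlenguyento s (chanlenguyento s)
def Claim_raises_chanlenguyento : Prop := (∀ (s : String), Dom_chanlenguyento s → Raises_chanlenguyento s → ¬ Pre_chanlenguyento s) ∧ (Dom_chanlenguyento (pvRaiseWitness_chanlenguyento) ∧ Raises_chanlenguyento (pvRaiseWitness_chanlenguyento) ∧ chanlenguyento_alt (pvRaiseWitness_chanlenguyento) = pvRaiseWitnessOut_chanlenguyento)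

-- ===== LEMMAS AND PROOFS =====

lemma pvPrimeLoopA_eq (n : Int) (l : List Int) :
    pvPrimeLoopA n l =
      if l.any (fun i => PySem.Int.mod n i == 0) then 0 else if 1 < n then 1 else 0 := by
  induction l with
  | nil => simp [pvPrimeLoopA]
  | cons a l ih =>
    simp only [pvPrimeLoopA, List.any_cons]
    by_cases h : PySem.Int.mod n a == 0 <;> simp [h, ih]

lemma pvPrimeLoopB_eq (x : Int) (l : List Int) :
    pvPrimeLoopB x l =
      (!(l.any (fun d => PySem.Int.mod x d == 0)) && decide (1 < x)) := by
  induction l with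
  | nil => simp [pvPrimeLoopB]
  | cons a l ih =>
    simp only [pvPrimeLoopB, List.any_cons]
    by_cases h : PySem.Int.mod x a == 0 <;> simp [h, ih]

-- for 0 ≤ n the two trial divisions find a divisor in exactly the same cases
lemma pvDvd_sqrt_iff (n : Int) (hn : 0 ≤ n) :
    ((PySem.List.pyRange 2 ((Nat.sqrt n.toNat : Int) + 1) 1).any (fun i => PySem.Int.mod n i == 0)) =
    ((PySem.List.pyRange 2 n 1).any (fun d => PySem.Int.mod n d == 0)) := by
  have hsq : ((Nat.sqrt n.toNat : Int)) * ((Nat.sqrt n.toNat : Int)) ≤ n := by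
    have h1 : Nat.sqrt n.toNat * Nat.sqrt n.toNat ≤ n.toNat := by
      simpa [pow_two] using Nat.sqrt_le' n.toNat
    have h2 : ((Nat.sqrt n.toNat * Nat.sqrt n.toNat : Nat) : Int) ≤ (n.toNat : Int) :=
      Int.ofNat_le.mpr h1
    rw [Int.toNat_of_nonneg hn] at h2
    push_cast at h2
    exact h2
  have hle : ∀ x : Int, 0 ≤ x → x * x ≤ n → x ≤ (Nat.sqrt n.toNat : Int) := by
    intro x hx hxx
    have hxN : x.toNat * x.toNat ≤ n.toNat := by
      have : ((x.toNat * x.toNat : Nat) : Int) ≤ ((n.toNat : Nat) : Int) := by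
        push_cast
        rw [Int.toNat_of_nonneg hx, Int.toNat_of_nonneg hn]
        exact hxx
      exact_mod_cast this
    have h := Nat.le_sqrt.mpr hxN
    calc x = (x.toNat : Int) := (Int.toNat_of_nonneg hx).symm
      _ ≤ (Nat.sqrt n.toNat : Int) := by exact_mod_cast h
  rw [Bool.eq_iff_iff]
  simp only [List.any_eq_true, PySem.List.mem_pyRange_one, beq_iff_eq,
    PySem.Int.mod_eq_zero_iff_dvd]
  constructor
  · rintro ⟨i, ⟨h2, hi⟩, hd⟩
    refine ⟨i, ⟨h2, ?_⟩, hd⟩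
    have hii : i ≤ (Nat.sqrt n.toNat : Int) := by omega
    have hmul : i * i ≤ n :=
      le_trans (mul_le_mul hii hii (by omega) (by positivity)) hsq
    nlinarith
  · rintro ⟨d, ⟨h2, hdn⟩, hd⟩
    obtain ⟨e, he⟩ := hd
    have hepos : 0 < e := by nlinarith
    have he1 : 1 < e := by nlinarith
    by_cases hc : d ≤ e
    · exact ⟨d, ⟨h2, by have := hle d (by omega) (by nlinarith); omega⟩, ⟨e, he⟩⟩
    · refine ⟨e, ⟨by omega, by have := hle e (by omega) (by nlinarith); omega⟩, ⟨d, by rw [he]; ring⟩⟩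

lemma pvPrime_eq (n : Int) (hn : 0 ≤ n) :
    pvPrimeA n = if pvPrimeB n then 1 else 0 := by
  unfold pvPrimeA pvPrimeB
  rw [pvPrimeLoopA_eq, pvPrimeLoopB_eq, pvDvd_sqrt_iff n hn]
  by_cases h : (PySem.List.pyRange 2 n 1).any (fun d => PySem.Int.mod n d == 0) <;>
    by_cases h2 : 1 < n <;> simp [h, h2]

-- A's two-disjunct branch condition is B's single parity mismatch
lemma pvCond_eq (i : Nat) (k : Int) :
    ((decide (i % 2 = 0) && (PySem.Int.mod k 2 != 0))
      || (decide (¬ i % 2 = 0) && (PySem.Int.mod k 2 == 0)))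
    = (PySem.Int.mod k 2 != PySem.Int.mod (i : Int) 2) := by
  have hm : PySem.Int.mod k 2 = k % 2 := PySem.Int.mod_eq_emod_of_pos (by omega)
  have hi2 : PySem.Int.mod (i : Int) 2 = ((i % 2 : Nat) : Int) := by
    rw [PySem.Int.mod_eq_emod_of_pos (by omega)]
    omega
  rw [hm, hi2]
  rcases Int.emod_two_eq_zero_or_one k with hk | hk <;>
    rcases Nat.mod_two_eq_zero_or_one i with hi | hi <;>
      simp [hk, hi]

-- the main loop, characterised from an arbitrary index/accumulator
lemma pvLoopA_eq (cs : List Char) : ∀ (i : Nat) (sum : Int),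
    pvLoopA cs i sum =
      if (PySem.List.enumerate (cs.map (fun c => (c.toNat : Int) - 48)) (i : Int)).any
          (fun p => PySem.Int.mod p.2 2 != PySem.Int.mod p.1 2) then 0
      else if pvPrimeA ((cs.map (fun c => (c.toNat : Int) - 48)).foldl (· + ·) sum) ≠ 0
        then 1 else 0 := by
  induction cs with
  | nil => intro i sum; simp [pvLoopA, PySem.List.enumerate_nil]
  | cons c rest ih =>
    intro i sum
    simp only [pvLoopA, List.map_cons, PySem.List.enumerate_cons, List.any_cons, List.foldl_cons]
    rw [pvCond_eq i ((c.toNat : Int) - 48)]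
    cases h : PySem.Int.mod ((c.toNat : Int) - 48) 2 != PySem.Int.mod (i : Int) 2 with
    | true => simp
    | false =>
      simp only [Bool.false_eq_true, if_false, Bool.false_or]
      rw [ih (i + 1) (sum + ((c.toNat : Int) - 48))]
      norm_cast

-- ===== VERDICT (by name: the statement is the Claim_ definition above) =====
theorem chanlenguyento_spec : Claim_equal_chanlenguyento := by
  intro s _ hpre
  unfold Spec_chanlenguyento chanlenguyento chanlenguyento_alt
  rw [pvLoopA_eq]
  simp only [Nat.cast_zero]
  split
  next h1 => rfl
  next h1 =>
    have hE := (Bool.not_eq_true _).mp h1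
    have hok : pvParityOK s.toList = true := by
      unfold pvParityOK
      rw [hE]
      rfl
    have hS := hpre hok
    unfold pvDigitSum at hS
    rw [pvPrime_eq _ hS]
    by_cases hb : pvPrimeB ((s.toList.map (fun c => (c.toNat : Int) - 48)).foldl (· + ·) 0) <;>
      simp [hb]

def chanlenguyento_raises : Claim_raises_chanlenguyento := by
  unfold Claim_raises_chanlenguyento
  constructor
  · rintro s _ ⟨h1, h2⟩ hpre
    exact absurd (hpre h1) (by omega)
  · exact ⟨by decide, by decide, by decide⟩
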